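-- pv_equiv track=rewrite | github.com/seungineer/Algorithm | 백준/Gold/1239. 차트/차트.py | count_half
-- ===== SOURCE A (Python) =====
-- def count_half(arr):
--     line = []
--     idx = 0
--     count = 0
--     for i in arr:
--         idx += i
--         line.append(idx)
--     for i in range(len(line) - 1):
--         for j in range(i + 1, len(line)):
--             if line[i] + 50 == line[j]:
--                 count += 1
--     return count
-- ===== SOURCE B (Python) =====
-- def count_half(arr):
--     seen = {}
--     idx = 0
--     count = 0
--     for i in arr:
--         idx += i
--         count += seen.get(idx - 50, 0)
--         seen[idx] = seen.get(idx, 0) + 1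
--     return count
-- ===== Notes on version B (the rewrite author's own statement) =====
-- stated objective: faster
-- what changed: Replaced the quadratic scan over all index pairs of the prefix-sum list by a single pass that looks up idx-50 in a hash map of earlier prefix-sum counts.
import Mathlib
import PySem

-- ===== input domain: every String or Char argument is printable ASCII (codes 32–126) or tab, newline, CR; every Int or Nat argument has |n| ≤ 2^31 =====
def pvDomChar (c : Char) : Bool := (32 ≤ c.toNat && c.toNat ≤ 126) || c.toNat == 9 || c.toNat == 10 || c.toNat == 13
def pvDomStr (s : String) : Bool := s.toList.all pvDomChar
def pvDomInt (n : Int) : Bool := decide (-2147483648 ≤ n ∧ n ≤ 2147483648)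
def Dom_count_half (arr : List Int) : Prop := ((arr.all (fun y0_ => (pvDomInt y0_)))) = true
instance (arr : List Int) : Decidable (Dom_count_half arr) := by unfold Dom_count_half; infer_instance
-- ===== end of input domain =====

-- B replaces A's quadratic double loop over the prefix-sum list by a single pass
-- with a dict counting earlier prefix sums (objective: faster, asymptotic).

-- ===== PORT A =====
def count_half (arr : List Int) : Int :=
  -- line = []; idx = 0; for i in arr: idx += i; line.append(idx)
  let st := arr.foldl (fun (st : List Int × Int) i => (st.1 ++ [st.2 + i], st.2 + i)) ([], 0)
  let line := st.1
  -- for i in range(len(line)-1): for j in range(i+1, len(line)): if line[i]+50 == line[j]: count += 1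
  (PySem.List.pyRange 0 (PySem.List.len line - 1) 1).foldl (fun count i =>
    (PySem.List.pyRange (i + 1) (PySem.List.len line) 1).foldl (fun count j =>
      if PySem.List.pyGetD line i 0 + 50 = PySem.List.pyGetD line j 0 then count + 1
      else count) count) 0

-- ===== PORT B =====
def count_half_alt (arr : List Int) : Int :=
  -- seen = {}; idx = 0; count = 0
  -- for i in arr: idx += i; count += seen.get(idx-50, 0); seen[idx] = seen.get(idx, 0) + 1
  let st := arr.foldl (fun (st : PySem.Dict Int Int × Int × Int) i =>
    let idx := st.2.1 + i
    let count := st.2.2 + st.1.getD (idx - 50) 0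
    (st.1.insert idx (st.1.getD idx 0 + 1), idx, count)) (PySem.Dict.empty, 0, 0)
  st.2.2

-- ===== PRECONDITION & SPEC =====
def Spec_count_half (arr : List Int) (out : Int) : Prop := out = count_half_alt arr
instance (arr : List Int) (out : Int) : Decidable (Spec_count_half arr out) := by unfold Spec_count_half; infer_instance

-- ===== CLAIM (what is proved, stated in full; the proofs are below) =====
def Claim_equal_count_half : Prop := ∀ (arr : List Int), Dom_count_half arr → Spec_count_half arr (count_half arr)

-- ===== LEMMAS AND PROOFS =====

-- prefix sums of xs starting from accumulator a (the list A calls `line`)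
def pvPrefs (a : Int) : List Int → List Int
  | [] => []
  | x :: xs => (a + x) :: pvPrefs (a + x) xs

-- number of pairs i < j with line[i] + 50 = line[j]
def pvPairs : List Int → Nat
  | [] => 0
  | x :: xs => xs.count (x + 50) + pvPairs xs

-- cross pairs: for each y in ys, how many elements of prev equal y - 50
def pvCross (prev ys : List Int) : Int :=
  (ys.map (fun y => ((prev.count (y - 50) : Nat) : Int))).sum

-- A's first loop builds exactly the prefix-sum list
lemma pvBuild (xs : List Int) (l : List Int) (a : Int) :
    xs.foldl (fun (st : List Int × Int) i => (st.1 ++ [st.2 + i], st.2 + i)) (l, a)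
      = (l ++ pvPrefs a xs, (pvPrefs a xs).getLastD a) := by
  induction xs generalizing l a with
  | nil => simp [pvPrefs]
  | cons x xs ih =>
    simp only [List.foldl_cons, pvPrefs, ih]
    refine Prod.ext (by simp) ?_
    cases pvPrefs (a + x) xs <;> simp [List.getLastD]

-- technical: indexing a list at a0, a0+1, … yields the dropped list
lemma pvMapDropNat (l : List Int) (a0 : Nat) :
    (List.range (l.length - a0)).map (fun k => l.getD (a0 + k) 0) = l.drop a0 := by
  apply List.ext_getElem
  · simp
  · intro i h1 h2
    simp only [List.getElem_map, List.getElem_range, List.getElem_drop]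
    have hlt : a0 + i < l.length := by simp at h1; omega
    rw [List.getD_eq_getElem l 0 hlt]

lemma pvMapDrop (l : List Int) (a : Int) (ha : 0 ≤ a) :
    (PySem.List.pyRange a (l.length : Int) 1).map (fun j => PySem.List.pyGetD l j 0)
      = l.drop a.toNat := by
  rw [PySem.List.pyRange_one, List.map_map]
  have h1 : ((l.length : Int) - a).toNat = l.length - a.toNat := by omega
  have h2 : (fun k : Nat => PySem.List.pyGetD l (a + (k : Int)) 0) = fun k : Nat => l.getD (a.toNat + k) 0 := by
    funext k
    have : a + (k : Int) = ((a.toNat + k : Nat) : Int) := by omega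
    rw [this, PySem.List.pyGetD_natCast]
  rw [h1]
  calc (List.range (l.length - a.toNat)).map ((fun j => PySem.List.pyGetD l j 0) ∘ fun k : Nat => a + (k : Int))
      = (List.range (l.length - a.toNat)).map (fun k => l.getD (a.toNat + k) 0) := by
        rw [show ((fun j => PySem.List.pyGetD l j 0) ∘ fun k : Nat => a + (k : Int)) = fun k : Nat => PySem.List.pyGetD l (a + (k : Int)) 0 from rfl, h2]
    _ = l.drop a.toNat := pvMapDropNat l a.toNat

-- the row sums of A's nested scan add up to pvPairs
lemma pvSumNat (l : List Int) :
    ((List.range (l.length - 1)).map (fun k => (l.drop (k + 1)).count (l.getD k 0 + 50))).sum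
      = pvPairs l := by
  induction l with
  | nil => simp [pvPairs]
  | cons x xs ih =>
    cases xs with
    | nil => simp [pvPairs]
    | cons y ys =>
      rw [pvPairs]
      rw [← ih]
      simp only [List.length_cons, Nat.add_sub_cancel, List.range_succ_eq_map,
        List.map_cons, List.map_map, List.sum_cons]
      have h1 : List.count ((x :: y :: ys).getD 0 0 + 50) (List.drop (0 + 1) (x :: y :: ys))
          = List.count (x + 50) (y :: ys) := by simp
      have h2 : List.map ((fun k => List.count ((x :: y :: ys).getD k 0 + 50)
            (List.drop (k + 1) (x :: y :: ys))) ∘ Nat.succ) (List.range ys.length)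
          = List.map (fun k => List.count ((y :: ys).getD k 0 + 50) (List.drop (k + 1) (y :: ys)))
            (List.range ys.length) := by
        apply List.map_congr_left
        intro k hk
        simp
      rw [h1, h2]

lemma pvCountDecide (v : Int) (l : List Int) :
    l.countP (fun y => decide (v = y)) = l.count v := by
  rw [List.count]
  apply List.countP_congr
  intro y _
  simp [@eq_comm Int]

-- A's inner loop adds the matches of line[i] among later entries
lemma pvInner (line : List Int) (c i : Int) (hi : 0 ≤ i) :
    (PySem.List.pyRange (i + 1) (PySem.List.len line) 1).foldl (fun count j =>
      if PySem.List.pyGetD line i 0 + 50 = PySem.List.pyGetD line j 0 then count + 1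
      else count) c
    = c + (((line.drop (i + 1).toNat).count (PySem.List.pyGetD line i 0 + 50) : Nat) : Int) := by
  rw [PySem.List.foldl_ite_add_one]
  congr 1
  rw [show PySem.List.len line = (line.length : Int) from PySem.List.len_eq line]
  rw [← pvMapDrop line (i + 1) (by omega), ← pvCountDecide]
  rw [List.countP_map]
  rfl

-- A's nested loops compute pvPairs of line
lemma pvAcount (line : List Int) :
    (PySem.List.pyRange 0 (PySem.List.len line - 1) 1).foldl (fun count i =>
      (PySem.List.pyRange (i + 1) (PySem.List.len line) 1).foldl (fun count j =>
        if PySem.List.pyGetD line i 0 + 50 = PySem.List.pyGetD line j 0 then count + 1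
        else count) count) 0 = (pvPairs line : Int) := by
  rw [PySem.List.foldl_congr_mem _ _
    (fun count i => count + (((line.drop (i + 1).toNat).count (PySem.List.pyGetD line i 0 + 50) : Nat) : Int)) _
    (by
      intro acc i hi
      have h0 : 0 ≤ i := (PySem.List.mem_pyRange_one.mp hi).1
      exact pvInner line acc i h0)]
  rw [PySem.List.foldl_add]
  rw [PySem.List.pyRange_one, List.map_map]
  have hmap : ((fun i : Int => (((line.drop (i + 1).toNat).count (PySem.List.pyGetD line i 0 + 50) : Nat) : Int)) ∘ fun k : Nat => 0 + (k : Int))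
      = fun k : Nat => (((line.drop (k + 1)).count (line.getD k 0 + 50) : Nat) : Int) := by
    funext k
    simp only [Function.comp, zero_add, PySem.List.pyGetD_natCast]
    rw [show ((k : Int) + 1).toNat = k + 1 from by omega]
  rw [hmap]
  have hn : (PySem.List.len line - 1 - 0).toNat = line.length - 1 := by
    rw [PySem.List.len_eq]; omega
  rw [hn]
  rw [← pvSumNat line, zero_add, Nat.cast_list_sum, List.map_map]
  simp only [Function.comp_def]

-- appending one element to prev adds its forward matches in ys
lemma pvCross_append (prev ys : List Int) (p : Int) :
    pvCross (prev ++ [p]) ys = pvCross prev ys + ((ys.count (p + 50) : Nat) : Int) := by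
  unfold pvCross
  induction ys with
  | nil => simp
  | cons y ys ih =>
    simp only [List.map_cons, List.sum_cons, List.count_cons, ih]
    rw [List.count_append]
    by_cases h : y = p + 50
    · subst h
      rw [show p + 50 - 50 = p from by ring]
      simp only [List.count_cons, BEq.rfl, if_true, List.count_nil]
      push_cast
      ring
    · have h1 : List.count (y - 50) [p] = 0 := by
        simp [List.count_singleton]
        omega
      have h2 : (y == p + 50) = false := by simp [h]
      rw [h1, h2]
      push_cast
      ring

-- B's loop, started with a dict counting prev, adds cross pairs plus pvPairs
lemma pvBloop (xs : List Int) (d : PySem.Dict Int Int) (prev : List Int) (a c : Int)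
    (h : ∀ v, d.getD v 0 = ((prev.count v : Nat) : Int)) :
    (xs.foldl (fun (st : PySem.Dict Int Int × Int × Int) i =>
      let idx := st.2.1 + i
      let count := st.2.2 + st.1.getD (idx - 50) 0
      (st.1.insert idx (st.1.getD idx 0 + 1), idx, count)) (d, a, c)).2.2
      = c + pvCross prev (pvPrefs a xs) + (pvPairs (pvPrefs a xs) : Int) := by
  induction xs generalizing d prev a c with
  | nil => simp [pvPrefs, pvCross, pvPairs]
  | cons x xs ih =>
    simp only [List.foldl_cons]
    rw [ih (d.insert (a + x) (d.getD (a + x) 0 + 1)) (prev ++ [a + x]) (a + x)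
      (c + d.getD (a + x - 50) 0)
      (by
        intro v
        rw [PySem.Dict.getD_insert]
        by_cases hv : v = a + x
        · subst hv
          simp [h, List.count_append]
        · simp [hv, h, List.count_append, List.count_singleton]
          omega)]
    simp only [pvPrefs, pvPairs, h]
    rw [pvCross_append]
    have hc : pvCross prev ((a + x) :: pvPrefs (a + x) xs)
        = ((prev.count (a + x - 50) : Nat) : Int) + pvCross prev (pvPrefs (a + x) xs) := by
      simp [pvCross]
    rw [hc]
    push_cast
    ring


-- ===== VERDICT (by name: the statement is the Claim_ definition above) =====
theorem count_half_spec : Claim_equal_count_half := by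
  intro arr _
  show count_half arr = count_half_alt arr
  unfold count_half count_half_alt
  rw [pvBuild, pvBloop arr PySem.Dict.empty [] 0 0 (by simp [pysem])]
  simp only [List.nil_append]
  exact (pvAcount (pvPrefs 0 arr)).trans (by simp [pvCross])
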